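-- pv_equiv track=rewrite | github.com/offero/algs | dcp798_synsent.py | equivalent_sentences
-- ===== SOURCE A (Python) =====
-- import string
--
-- def tokenize(sent):
--     # split on space
--     # remove extra space
--     # handle punctuation, multiple spaces
--     tokens = []
--     token = []
--     for char in sent:
--         if char in string.punctuation: # handle puntuation
--             tokens.append(''.join(token))
--             token.clear()
--             tokens.append(char)
--         elif char == ' ': # handle spaces
--             if tokens and tokens[-1] == ' ':
--                 continue
--             tokens.append(''.join(token))
--             token.clear()
--         else: # assume valid word characters
--             token.append(char)
--
--     # end of sentence
--     if token:
--         tokens.append(''.join(token))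
--         token.clear()
--     return tokens
--
-- def create_syn_map(syns):
--     syn_map = {}
--     for i, synset in enumerate(syns):
--         for word in synset:
--             syn_map[word] = i
--     return syn_map
--
-- def equivalent_sentences(sent1, sent2, syns):
--     # tokenize sentences
--     sent1_tok = tokenize(sent1)
--     sent2_tok = tokenize(sent2)
--
--     # check length and maybe bail
--     if len(sent1_tok) != len(sent2_tok):
--         return False
--
--     # create synonym quick lookup structure
--     syn_map = create_syn_map(syns)
--
--     # scan through sentences
--     for word1, word2 in zip(sent1_tok, sent2_tok):
--         # if word match, continue
--         if word1 == word2: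
--             continue
--         # if not, check syn
--         if word1 in syn_map and \
--             word2 in syn_map and \
--             syn_map[word1] == syn_map[word2]:
--                 continue
--         return False
--
--     return True
-- ===== SOURCE B (Python) =====
-- import string
--
-- def tokenize(sent):
--     tokens = []
--     token = []
--     for char in sent:
--         if char in string.punctuation:
--             tokens.append(''.join(token))
--             token.clear()
--             tokens.append(char)
--         elif char == ' ':
--             if tokens and tokens[-1] == ' ':
--                 continue
--             tokens.append(''.join(token))
--             token.clear()
--         else:
--             token.append(char)
--     if token:
--         tokens.append(''.join(token))
--         token.clear()
--     return tokens
--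
-- def _same_group(w1, w2, syns):
--     # last synset containing each word wins (mirrors dict-overwrite semantics);
--     # one combined scan of syns, no index structure is built
--     g1 = None
--     g2 = None
--     for i, synset in enumerate(syns):
--         if w1 in synset:
--             g1 = i
--         if w2 in synset:
--             g2 = i
--     return g1 is not None and g1 == g2
--
-- def equivalent_sentences(sent1, sent2, syns):
--     ts1 = tokenize(sent1)
--     ts2 = tokenize(sent2)
--     if len(ts1) != len(ts2):
--         return False
--     return all(w1 == w2 or _same_group(w1, w2, syns)
--                for w1, w2 in zip(ts1, ts2))
-- ===== Notes on version B (the rewrite author's own statement) =====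
-- stated objective: alternative
-- what changed: Drops the precomputed word-to-synset-index dict entirely: each pair of differing tokens is judged by a direct scan of syns (last containing synset wins, matching dict-overwrite semantics), and the early-exit loop becomes an all() over the zipped token pairs.
import Mathlib
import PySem

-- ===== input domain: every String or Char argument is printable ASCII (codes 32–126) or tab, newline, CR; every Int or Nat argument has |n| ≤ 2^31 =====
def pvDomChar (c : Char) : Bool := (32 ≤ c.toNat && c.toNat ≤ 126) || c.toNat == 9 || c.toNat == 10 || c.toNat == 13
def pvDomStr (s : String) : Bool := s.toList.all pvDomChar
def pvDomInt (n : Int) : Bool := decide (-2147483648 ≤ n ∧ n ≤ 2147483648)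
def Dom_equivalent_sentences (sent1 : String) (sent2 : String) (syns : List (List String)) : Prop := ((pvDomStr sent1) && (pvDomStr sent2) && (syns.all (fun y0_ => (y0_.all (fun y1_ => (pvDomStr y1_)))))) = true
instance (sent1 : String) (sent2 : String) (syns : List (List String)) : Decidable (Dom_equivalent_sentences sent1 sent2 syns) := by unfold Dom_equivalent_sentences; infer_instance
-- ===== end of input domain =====

-- B drops A's precomputed word→synset-index dict: each differing token pair is judged by one
-- direct scan of syns (last containing synset wins), and the early-exit loop becomes all();
-- objective: alternative (no auxiliary index, at the price of a scan per differing pair).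

-- ===== PORT A =====
-- string.punctuation
def pyPunctuation : List Char := "!\"#$%&'()*+,-./:;<=>?@[\\]^_`{|}~".toList

-- tokenize(sent): helper shared verbatim by Source A and Source B
def tokenizeStep (st : List String × List Char) (char : Char) : List String × List Char :=
  if pyPunctuation.contains char then
    (st.1 ++ [String.ofList st.2] ++ [String.ofList [char]], [])
  else if char = ' ' then
    (if st.1 ≠ [] ∧ st.1.getLast? = some " " then st
     else (st.1 ++ [String.ofList st.2], []))
  else
    (st.1, st.2 ++ [char])

def tokenize (sent : String) : List String :=
  let st := sent.toList.foldl tokenizeStep ([], [])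
  if st.2 ≠ [] then st.1 ++ [String.ofList st.2] else st.1

-- create_syn_map(syns): A's synonym index
def create_syn_map (syns : List (List String)) : PySem.Dict String Int :=
  (PySem.List.enumerate syns).foldl
    (fun syn_map p => p.2.foldl (fun m word => m.insert word p.1) syn_map)
    PySem.Dict.empty

-- A's scan loop over zip(sent1_tok, sent2_tok) with early return False
def scanA (m : PySem.Dict String Int) : List (String × String) → Bool
  | [] => true
  | (word1, word2) :: rest =>
    if word1 = word2 then scanA m rest
    else if m.contains word1 ∧ m.contains word2 ∧ m.get? word1 = m.get? word2 then
      scanA m rest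
    else false

def equivalent_sentences (sent1 : String) (sent2 : String) (syns : List (List String)) : Bool :=
  let sent1_tok := tokenize sent1
  let sent2_tok := tokenize sent2
  if sent1_tok.length ≠ sent2_tok.length then false
  else
    let syn_map := create_syn_map syns
    scanA syn_map (sent1_tok.zip sent2_tok)

-- ===== PORT B =====
-- _same_group(w1, w2, syns): one combined forward scan of syns, last containing synset wins
def same_group (w1 w2 : String) (syns : List (List String)) : Bool :=
  let g := (PySem.List.enumerate syns).foldl
    (fun (g : Option Int × Option Int) q =>
      (if q.2.contains w1 then some q.1 else g.1,
       if q.2.contains w2 then some q.1 else g.2))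
    (none, none)
  g.1.isSome && g.1 == g.2

def equivalent_sentences_alt (sent1 : String) (sent2 : String) (syns : List (List String)) : Bool :=
  let ts1 := tokenize sent1
  let ts2 := tokenize sent2
  if ts1.length ≠ ts2.length then false
  else (ts1.zip ts2).all (fun p => p.1 == p.2 || same_group p.1 p.2 syns)

-- ===== PRECONDITION & SPEC =====
def Spec_equivalent_sentences (sent1 : String) (sent2 : String) (syns : List (List String)) (out : Bool) : Prop := out = equivalent_sentences_alt sent1 sent2 syns
instance (sent1 : String) (sent2 : String) (syns : List (List String)) (out : Bool) : Decidable (Spec_equivalent_sentences sent1 sent2 syns out) := by unfold Spec_equivalent_sentences; infer_instance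

-- ===== CLAIM =====
def Claim_equal_equivalent_sentences : Prop := ∀ (sent1 : String) (sent2 : String) (syns : List (List String)), Dom_equivalent_sentences sent1 sent2 syns → Spec_equivalent_sentences sent1 sent2 syns (equivalent_sentences sent1 sent2 syns)

-- ===== LEMMAS AND PROOFS =====
lemma pairfold_eq (w1 w2 : String) :
    ∀ (l : List (Int × List String)) (a b : Option Int),
      l.foldl (fun g q =>
          (if q.2.contains w1 then some q.1 else g.1,
           if q.2.contains w2 then some q.1 else g.2)) (a, b) =
        (l.foldl (fun g p => if p.2.contains w1 then some p.1 else g) a,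
         l.foldl (fun g p => if p.2.contains w2 then some p.1 else g) b) := by
  intro l
  induction l with
  | nil => intro a b; rfl
  | cons x t ih => intro a b; simp only [List.foldl_cons]; exact ih _ _

lemma get?_foldl_insert (ws : List String) (i : Int) (m : PySem.Dict String Int) (w : String) :
    (ws.foldl (fun m word => m.insert word i) m).get? w =
      if ws.contains w then some i else m.get? w := by
  induction ws generalizing m with
  | nil => simp
  | cons a t ih =>
    simp only [List.foldl_cons, ih]
    by_cases h : w = a
    · subst h
      by_cases ht : t.contains w <;> simp [PySem.Dict.get?_insert_self]
    · simp [h, PySem.Dict.get?_insert]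

lemma get?_create_fold (w : String) :
    ∀ (l : List (Int × List String)) (m : PySem.Dict String Int),
      (l.foldl (fun m p => p.2.foldl (fun m word => m.insert word p.1) m) m).get? w =
        l.foldl (fun g p => if p.2.contains w then some p.1 else g) (m.get? w) := by
  intro l
  induction l with
  | nil => intro m; rfl
  | cons p t ih =>
    intro m
    simp only [List.foldl_cons]
    rw [ih, get?_foldl_insert]

lemma get?_create (syns : List (List String)) (w : String) :
    (create_syn_map syns).get? w =
      (PySem.List.enumerate syns).foldl
        (fun g p => if p.2.contains w then some p.1 else g) none := by
  unfold create_syn_map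
  rw [get?_create_fold]
  simp

lemma same_group_eq (w1 w2 : String) (syns : List (List String)) :
    same_group w1 w2 syns =
      (((create_syn_map syns).get? w1).isSome &&
        ((create_syn_map syns).get? w1 == (create_syn_map syns).get? w2)) := by
  simp only [same_group, pairfold_eq w1 w2, get?_create]

lemma scanA_step (syns : List (List String)) (a b : String) (t : List (String × String)) :
    scanA (create_syn_map syns) ((a, b) :: t) =
      ((a == b || same_group a b syns) && scanA (create_syn_map syns) t) := by
  have hc : ∀ w : String,
      (create_syn_map syns).contains w = ((create_syn_map syns).get? w).isSome :=
    fun w => PySem.Dict.contains_eq_isSome_get? _ w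
  rw [same_group_eq]
  simp only [scanA]
  by_cases hab : a = b
  · subst hab; simp
  · rcases ha : (create_syn_map syns).get? a with _ | i <;>
      rcases hb : (create_syn_map syns).get? b with _ | j <;>
      simp [hab, hc, ha, hb] <;>
      by_cases hij : i = j <;> simp [hij, hab]

lemma scanA_eq_all (syns : List (List String)) (l : List (String × String)) :
    scanA (create_syn_map syns) l =
      l.all (fun p => p.1 == p.2 || same_group p.1 p.2 syns) := by
  induction l with
  | nil => rfl
  | cons p t ih =>
    obtain ⟨a, b⟩ := p
    rw [scanA_step, ih, List.all_cons]

-- ===== VERDICT =====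
theorem equivalent_sentences_spec : Claim_equal_equivalent_sentences := by
  intro sent1 sent2 syns _
  unfold Spec_equivalent_sentences equivalent_sentences equivalent_sentences_alt
  by_cases hlen : (tokenize sent1).length ≠ (tokenize sent2).length
  · simp [hlen]
  · simp only [hlen, if_false]
    exact scanA_eq_all syns _
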